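-- pv_equiv track=rewrite | github.com/pypi-data/pypi-mirror-404 | packages/codecrate/codecrate-0.1.1-py3-none-any.whl/codecrate/mdparse.py | _parse_stubbed_files
-- ===== SOURCE A (Python) =====
-- def _section_bounds(title: str, text_lines: list[str]) -> tuple[int, int]:
--     start = None
--     for i, ln in enumerate(text_lines):
--         if ln.strip() == title:
--             start = i + 1
--             break
--     if start is None:
--         return (0, len(text_lines))
--     end = len(text_lines)
--     for j in range(start, len(text_lines)):
--         if text_lines[j].startswith("## ") and text_lines[j].strip() != title:
--             end = j
--             break
--     return (start, end)
--
-- def _parse_stubbed_files(text_lines: list[str]) -> dict[str, str]: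
--     stubbed_files: dict[str, str] = {}
--     fs_start, fs_end = _section_bounds("## Files", text_lines)
--     i = fs_start
--     while i < fs_end:
--         line = text_lines[i]
--         if line.startswith("### `") and "`" in line:
--             start = line.find("`") + 1
--             end = line.find("`", start)
--             rel = line[start:end]
--             parts: list[str] = []
--             j = i + 1
--             while j < fs_end and not (
--                 text_lines[j].startswith("### `") and "`" in text_lines[j]
--             ):
--                 fence = text_lines[j].strip()
--                 if fence.startswith("```") and fence != "```":
--                     k = j + 1
--                     buf: list[str] = []
--                     while k < fs_end and text_lines[k].strip() != "```":
--                         buf.append(text_lines[k])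
--                         k += 1
--                     if buf:
--                         chunk = "\n".join(buf)
--                         if not chunk.endswith("\n"):
--                             chunk += "\n"
--                         parts.append(chunk)
--                     j = k + 1
--                     continue
--                 j += 1
--             if parts:
--                 stubbed_files[rel] = "".join(parts)
--             else:
--                 stubbed_files[rel] = ""
--             i = j
--             continue
--         i += 1
--     return stubbed_files
-- ===== SOURCE B (Python) =====
-- def _close_fence(buf: list[str], parts: list[str]) -> None:
--     if buf:
--         chunk = "\n".join(buf)
--         if not chunk.endswith("\n"):
--             chunk += "\n"
--         parts.append(chunk)
--
--
-- def _parse_stubbed_files(text_lines: list[str]) -> dict[str, str]: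
--     n = len(text_lines)
--     idx = next((i for i, ln in enumerate(text_lines) if ln.strip() == "## Files"), None)
--     if idx is None:
--         lo, hi = 0, n
--     else:
--         lo = idx + 1
--         off = next((j for j, ln in enumerate(text_lines[lo:])
--                     if ln.startswith("## ") and ln.strip() != "## Files"), None)
--         hi = n if off is None else lo + off
--     result: dict[str, str] = {}
--     rel = None            # current file header key; None = before the first header
--     parts: list[str] = [] # finished fence chunks of the current file
--     buf = None            # None = not inside a code fence, else the fence's lines
--     for ln in text_lines[lo:hi]:
--         s = ln.strip()
--         if buf is not None:
--             if s == "```":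
--                 _close_fence(buf, parts)
--                 buf = None
--             else:
--                 buf.append(ln)
--         elif ln.startswith("### `"):
--             if rel is not None:
--                 result[rel] = "".join(parts)
--             rel = ln[5:ln.find("`", 5)]
--             parts = []
--         elif rel is not None and s.startswith("```") and s != "```":
--             buf = []
--     if buf is not None:
--         _close_fence(buf, parts)
--     if rel is not None:
--         result[rel] = "".join(parts)
--     return result
-- ===== Notes on version B (the rewrite author's own statement) =====
-- stated objective: simpler
-- what changed: Replaces A's three nested index-juggling while loops with a single flat state-machine pass (current file key, finished chunks, open fence buffer) over the section slice, with the section bounds found by next()/enumerate scans.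
import Mathlib
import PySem

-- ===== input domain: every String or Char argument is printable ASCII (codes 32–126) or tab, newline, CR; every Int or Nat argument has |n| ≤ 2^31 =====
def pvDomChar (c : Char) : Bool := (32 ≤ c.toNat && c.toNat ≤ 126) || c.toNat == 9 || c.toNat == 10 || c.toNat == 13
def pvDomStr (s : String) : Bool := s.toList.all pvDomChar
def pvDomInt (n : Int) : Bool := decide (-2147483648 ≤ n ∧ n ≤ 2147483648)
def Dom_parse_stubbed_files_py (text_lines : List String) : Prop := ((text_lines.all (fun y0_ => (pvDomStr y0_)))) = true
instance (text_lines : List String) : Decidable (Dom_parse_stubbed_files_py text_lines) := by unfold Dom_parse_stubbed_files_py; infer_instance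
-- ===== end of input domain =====

-- B replaces A's three nested index-juggling while loops by a single state-machine pass over the
-- "## Files" section slice (objective: simpler); return values proved equal on the whole domain.


-- ===== PORT A =====
-- Python's while loops are ported with an explicit fuel argument (structural recursion); every
-- call below supplies enough fuel for the loop to run to its Python exit condition.

-- first loop of _section_bounds: first index i with text_lines[i].strip() == title, start = i+1
def pvA_startLoop (title : String) : List String → Nat → Option Nat
  | [], _ => none
  | ln :: rest, i => if PySem.Str.strip ln = title then some (i + 1) else pvA_startLoop title rest (i + 1)

-- second loop of _section_bounds
def pvA_endLoop (title : String) (lines : List String) : Nat → Nat → Nat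
  | 0, _ => lines.length
  | fuel + 1, j =>
    if j < lines.length then
      if PySem.Str.startswith (lines.getD j "") "## " && !(PySem.Str.strip (lines.getD j "") == title) then j
      else pvA_endLoop title lines fuel (j + 1)
    else lines.length

def pvA_bounds (title : String) (lines : List String) : Nat × Nat :=
  match pvA_startLoop title lines 0 with
  | none => (0, lines.length)
  | some s => (s, pvA_endLoop title lines lines.length s)

-- line.startswith("### `") and "`" in line
def pvA_header (ln : String) : Bool := PySem.Str.startswith ln "### `" && PySem.Str.isIn "`" ln

-- rel = line[line.find("`")+1 : line.find("`", start)]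
def pvA_rel (line : String) : String :=
  let start := PySem.Str.find line "`" + 1
  let e := PySem.Str.findFrom line "`" start
  PySem.Str.slice line (some start) (some e)

-- chunk = "\n".join(buf); if not chunk.endswith("\n"): chunk += "\n"
def pvA_chunk (buf : List String) : String :=
  let chunk := PySem.Str.join "\n" buf
  if !(PySem.Str.endswith chunk "\n") then PySem.Str.join "" [chunk, "\n"] else chunk

-- innermost while: collect fence body lines
def pvA_kloop (lines : List String) (fs_end : Nat) : Nat → Nat → List String → Nat × List String
  | 0, k, buf => (k, buf)
  | fuel + 1, k, buf =>
    if k < fs_end ∧ ¬ PySem.Str.strip (lines.getD k "") = "```" then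
      pvA_kloop lines fs_end fuel (k + 1) (buf ++ [lines.getD k ""])
    else (k, buf)

-- middle while: scan one file block for fences
def pvA_jloop (lines : List String) (fs_end : Nat) : Nat → Nat → List String → Nat × List String
  | 0, j, parts => (j, parts)
  | fuel + 1, j, parts =>
    if j < fs_end ∧ ¬ pvA_header (lines.getD j "") = true then
      let fence := PySem.Str.strip (lines.getD j "")
      if PySem.Str.startswith fence "```" = true ∧ ¬ fence = "```" then
        let r := pvA_kloop lines fs_end fs_end (j + 1) []
        let parts' := if ¬ r.2 = [] then parts ++ [pvA_chunk r.2] else parts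
        pvA_jloop lines fs_end fuel (r.1 + 1) parts'
      else pvA_jloop lines fs_end fuel (j + 1) parts
    else (j, parts)

-- outer while over the section
def pvA_iloop (lines : List String) (fs_end : Nat) :
    Nat → Nat → PySem.Dict String String → PySem.Dict String String
  | 0, _, d => d
  | fuel + 1, i, d =>
    if i < fs_end then
      let line := lines.getD i ""
      if pvA_header line = true then
        let rel := pvA_rel line
        let r := pvA_jloop lines fs_end fs_end (i + 1) []
        let d' := if ¬ r.2 = [] then d.insert rel (PySem.Str.join "" r.2) else d.insert rel ""
        pvA_iloop lines fs_end fuel r.1 d'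
      else pvA_iloop lines fs_end fuel (i + 1) d
    else d

def parse_stubbed_files_py (text_lines : List String) : List (String × String) :=
  let b := pvA_bounds "## Files" text_lines
  (pvA_iloop text_lines b.2 b.2 b.1 PySem.Dict.empty).items

-- ===== PORT B =====
-- section bounds via next()/enumerate scans
def pvB_bounds (lines : List String) : Nat × Nat :=
  match lines.findIdx? (fun ln => PySem.Str.strip ln == "## Files") with
  | none => (0, lines.length)
  | some idx =>
    let lo := idx + 1
    match (lines.drop lo).findIdx?
        (fun ln => PySem.Str.startswith ln "## " && !(PySem.Str.strip ln == "## Files")) with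
    | none => (lo, lines.length)
    | some off => (lo, lo + off)

-- _close_fence
def pvB_close (buf parts : List String) : List String :=
  if ¬ buf = [] then
    let chunk := PySem.Str.join "\n" buf
    let chunk := if !(PySem.Str.endswith chunk "\n") then PySem.Str.join "" [chunk, "\n"] else chunk
    parts ++ [chunk]
  else parts

-- rel = ln[5:ln.find("`", 5)]
def pvB_rel (ln : String) : String :=
  PySem.Str.slice ln (some 5) (some (PySem.Str.findFrom ln "`" 5))

-- the state of B's single pass
structure PvBState where
  rel : Option String
  parts : List String
  buf : Option (List String)
  res : PySem.Dict String String
deriving Repr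

def pvB_step (st : PvBState) (ln : String) : PvBState :=
  let s := PySem.Str.strip ln
  match st.buf with
  | some buf =>
    if s = "```" then { st with parts := pvB_close buf st.parts, buf := none }
    else { st with buf := some (buf ++ [ln]) }
  | none =>
    if PySem.Str.startswith ln "### `" then
      let res := match st.rel with
        | some r => st.res.insert r (PySem.Str.join "" st.parts)
        | none => st.res
      { rel := some (pvB_rel ln), parts := [], buf := none, res := res }
    else if st.rel.isSome ∧ PySem.Str.startswith s "```" = true ∧ ¬ s = "```" then
      { st with buf := some [] }
    else st

-- the trailing flush after the loop, then the final assignment of the open file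
def pvB_fin (st : PvBState) : PySem.Dict String String :=
  let parts := match st.buf with | some buf => pvB_close buf st.parts | none => st.parts
  match st.rel with
  | some r => st.res.insert r (PySem.Str.join "" parts)
  | none => st.res

def parse_stubbed_files_py_alt (text_lines : List String) : List (String × String) :=
  let b := pvB_bounds text_lines
  let region := PySem.List.slice text_lines (some (b.1 : Int)) (some (b.2 : Int))
  (pvB_fin (region.foldl pvB_step ⟨none, [], none, PySem.Dict.empty⟩)).items

-- ===== PRECONDITION & SPEC =====
def Spec_parse_stubbed_files_py (text_lines : List String) (out : List (String × String)) : Prop := out = parse_stubbed_files_py_alt text_lines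
instance (text_lines : List String) (out : List (String × String)) : Decidable (Spec_parse_stubbed_files_py text_lines out) := by unfold Spec_parse_stubbed_files_py; infer_instance

-- ===== CLAIM (what is proved, stated in full; the proofs are below) =====
def Claim_equal_parse_stubbed_files_py : Prop := ∀ (text_lines : List String), Dom_parse_stubbed_files_py text_lines → Spec_parse_stubbed_files_py text_lines (parse_stubbed_files_py text_lines)

-- ===== LEMMAS AND PROOFS =====

theorem pv_join_nil : PySem.Str.join "" [] = "" := by decide

theorem pv_header_eq (ln : String) : pvA_header ln = PySem.Str.startswith ln "### `" := by
  unfold pvA_header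
  cases hb : PySem.Str.startswith ln "### `" with
  | false => simp
  | true =>
    simp only [Bool.true_and]
    rw [PySem.Str.startswith_eq, PySem.Chars.startswith_iff] at hb
    rw [PySem.Str.isIn_iff_infix]
    exact List.IsInfix.trans (l₂ := "### `".toList) (by decide) hb.isInfix

theorem pv_find4 (ln : String) (h : PySem.Str.startswith ln "### `" = true) :
    PySem.Str.find ln "`" = 4 := by
  rw [PySem.Str.startswith_eq, PySem.Chars.startswith_iff] at h
  obtain ⟨t, ht⟩ := h
  simp at ht
  rw [PySem.Str.find_eq]
  have hpre : "`".toList <+: ln.toList.drop 4 := by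
    rw [← ht]; simp
  have hn : (0:Int) ≤ PySem.Chars.find ln.toList "`".toList := by
    rw [PySem.Chars.find_nonneg_iff]
    exact ⟨ln.toList.take 4, ln.toList.drop 5, by rw [← ht]; simp⟩
  obtain ⟨h1, h2⟩ := PySem.Chars.find_spec (s := ln.toList) (sub := "`".toList) hn
  set f := PySem.Chars.find ln.toList "`".toList with hf
  have h4 : f.toNat ≤ 4 := by
    by_contra hgt
    exact h2 4 (by omega) hpre
  interval_cases hfc : f.toNat
  all_goals first
  | omega
  | (rw [← ht] at h1; simp at h1)

theorem pv_rel_eq (ln : String) (h : PySem.Str.startswith ln "### `" = true) :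
    pvA_rel ln = pvB_rel ln := by
  unfold pvA_rel pvB_rel
  rw [pv_find4 ln h]
  norm_num

theorem pv_close_eq (buf parts : List String) :
    pvB_close buf parts = if ¬ buf = [] then parts ++ [pvA_chunk buf] else parts := rfl

theorem pv_insert_branch (d : PySem.Dict String String) (r : String) (parts : List String) :
    (if ¬ parts = [] then d.insert r (PySem.Str.join "" parts) else d.insert r "") =
      d.insert r (PySem.Str.join "" parts) := by
  by_cases h : parts = []
  · simp [h, pv_join_nil]
  · simp [h]

theorem pv_startLoop_eq (title : String) (lines : List String) (i : Nat) :
    pvA_startLoop title lines i =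
      (lines.findIdx? (fun ln => PySem.Str.strip ln == title)).map (fun t => i + t + 1) := by
  induction lines generalizing i with
  | nil => simp [pvA_startLoop]
  | cons ln rest ih =>
    rw [pvA_startLoop, List.findIdx?_cons]
    by_cases hc : PySem.Str.strip ln = title
    · simp [hc]
    · simp only [hc, if_false, beq_iff_eq, ih]
      cases rest.findIdx? (fun ln => PySem.Str.strip ln == title) <;> simp <;> omega

theorem pv_endLoop_eq (title : String) (lines : List String) (fuel j : Nat)
    (hj : j ≤ lines.length) (hf : lines.length - j ≤ fuel) :
    pvA_endLoop title lines fuel j =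
      (match (lines.drop j).findIdx?
          (fun ln => PySem.Str.startswith ln "## " && !(PySem.Str.strip ln == title)) with
        | none => lines.length
        | some off => j + off) := by
  induction fuel generalizing j with
  | zero =>
    have hje : j = lines.length := by omega
    subst hje
    rw [pvA_endLoop]
    simp
  | succ fuel ih =>
    by_cases h : j < lines.length
    · have hd : lines.drop j = lines[j] :: lines.drop (j + 1) := List.drop_eq_getElem_cons h
      have hg : lines.getD j "" = lines[j] := List.getD_eq_getElem lines "" h
      rw [pvA_endLoop, hd, List.findIdx?_cons, hg, if_pos h]
      by_cases hc : (PySem.Str.startswith lines[j] "## " && !(PySem.Str.strip lines[j] == title)) = true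
      · rw [if_pos hc]
        simp only [hc, if_true, Nat.add_zero]
      · rw [if_neg hc]
        rw [ih (j + 1) (by omega) (by omega)]
        simp only [hc, Bool.false_eq_true, if_false]
        cases (lines.drop (j + 1)).findIdx?
            (fun ln => PySem.Str.startswith ln "## " && !(PySem.Str.strip ln == title)) with
        | none => simp
        | some v => (simp only [Option.map_some]; ring)
    · have hje : j = lines.length := by omega
      subst hje
      rw [pvA_endLoop]
      simp

theorem pv_findIdx?_lt {l : List String} {p : String → Bool} {i : Nat}
    (h : l.findIdx? p = some i) : i < l.length := by
  have := List.findIdx?_eq_some_iff_findIdx_eq.mp h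
  omega

theorem pv_bounds_eq (lines : List String) : pvB_bounds lines = pvA_bounds "## Files" lines := by
  unfold pvA_bounds pvB_bounds
  rw [pv_startLoop_eq]
  cases hf : lines.findIdx? (fun ln => PySem.Str.strip ln == "## Files") with
  | none => simp
  | some idx =>
    have hlt : idx < lines.length := pv_findIdx?_lt hf
    simp only [Option.map_some]
    rw [show (0 + idx + 1) = idx + 1 by omega,
      pv_endLoop_eq "## Files" lines lines.length (idx + 1) (by omega) (by omega)]
    cases (lines.drop (idx + 1)).findIdx?
        (fun ln => PySem.Str.startswith ln "## " && !(PySem.Str.strip ln == "## Files")) <;> simp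

theorem pv_bounds_le (lines : List String) :
    (pvA_bounds "## Files" lines).1 ≤ (pvA_bounds "## Files" lines).2 ∧
      (pvA_bounds "## Files" lines).2 ≤ lines.length := by
  rw [← pv_bounds_eq]
  unfold pvB_bounds
  cases hf : lines.findIdx? (fun ln => PySem.Str.strip ln == "## Files") with
  | none => simp
  | some idx =>
    have hlt : idx < lines.length := pv_findIdx?_lt hf
    simp only
    cases hg : (lines.drop (idx + 1)).findIdx?
        (fun ln => PySem.Str.startswith ln "## " && !(PySem.Str.strip ln == "## Files")) with
    | none => simp; omega
    | some off =>
      have : off < (lines.drop (idx + 1)).length := pv_findIdx?_lt hg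
      simp at this ⊢
      omega

theorem pvA_kloop_le (lines : List String) (fs_end : Nat) :
    ∀ (fuel k : Nat) (buf : List String), k ≤ (pvA_kloop lines fs_end fuel k buf).1 := by
  intro fuel
  induction fuel with
  | zero => intro k buf; rw [pvA_kloop]
  | succ fuel ih =>
    intro k buf
    rw [pvA_kloop]
    by_cases h : k < fs_end ∧ ¬ PySem.Str.strip (lines.getD k "") = "```"
    · rw [if_pos h]
      have := ih (k + 1) (buf ++ [lines.getD k ""])
      omega
    · rw [if_neg h]

-- loop-exit shapes, uniform in the fuel
theorem pvA_iloop_stop (lines : List String) (hi : Nat) (fuel i : Nat)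
    (d : PySem.Dict String String) (h : ¬ i < hi) :
    pvA_iloop lines hi fuel i d = d := by
  cases fuel with
  | zero => rw [pvA_iloop]
  | succ fuel => rw [pvA_iloop, if_neg h]

theorem pvA_jloop_stop (lines : List String) (hi : Nat) (fuel j : Nat) (parts : List String)
    (h : ¬ (j < hi ∧ ¬ pvA_header (lines.getD j "") = true)) :
    pvA_jloop lines hi fuel j parts = (j, parts) := by
  cases fuel with
  | zero => rw [pvA_jloop]
  | succ fuel => rw [pvA_jloop, if_neg h]

theorem pvA_iloop_skip (lines : List String) (hi fuel i : Nat) (d : PySem.Dict String String)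
    (h1 : i < hi) (hh : pvA_header (lines.getD i "") = false) :
    pvA_iloop lines hi (fuel + 1) i d = pvA_iloop lines hi fuel (i + 1) d := by
  rw [pvA_iloop, if_pos h1]
  simp only [hh, Bool.false_eq_true, if_false]

theorem pvA_iloop_head (lines : List String) (hi fuel i : Nat) (d : PySem.Dict String String)
    (h1 : i < hi) (hh : pvA_header (lines.getD i "") = true) :
    pvA_iloop lines hi (fuel + 1) i d =
      pvA_iloop lines hi fuel (pvA_jloop lines hi hi (i + 1) []).1
        (if ¬ (pvA_jloop lines hi hi (i + 1) []).2 = [] then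
          d.insert (pvA_rel (lines.getD i "")) (PySem.Str.join "" (pvA_jloop lines hi hi (i + 1) []).2)
        else d.insert (pvA_rel (lines.getD i "")) "") := by
  rw [pvA_iloop, if_pos h1]
  simp only [hh, if_true]

theorem pvA_jloop_open (lines : List String) (hi fuel j : Nat) (parts : List String)
    (h1 : j < hi) (hh : pvA_header (lines.getD j "") = false)
    (hop : PySem.Str.startswith (PySem.Str.strip (lines.getD j "")) "```" = true ∧
      ¬ PySem.Str.strip (lines.getD j "") = "```") :
    pvA_jloop lines hi (fuel + 1) j parts =
      pvA_jloop lines hi fuel ((pvA_kloop lines hi hi (j + 1) []).1 + 1)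
        (if ¬ (pvA_kloop lines hi hi (j + 1) []).2 = [] then
          parts ++ [pvA_chunk (pvA_kloop lines hi hi (j + 1) []).2] else parts) := by
  rw [pvA_jloop, if_pos ⟨h1, by rw [hh]; simp⟩]
  simp only [if_pos hop]

theorem pvA_jloop_skip (lines : List String) (hi fuel j : Nat) (parts : List String)
    (h1 : j < hi) (hh : pvA_header (lines.getD j "") = false)
    (hop : ¬ (PySem.Str.startswith (PySem.Str.strip (lines.getD j "")) "```" = true ∧
      ¬ PySem.Str.strip (lines.getD j "") = "```")) :
    pvA_jloop lines hi (fuel + 1) j parts = pvA_jloop lines hi fuel (j + 1) parts := by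
  rw [pvA_jloop, if_pos ⟨h1, by rw [hh]; simp⟩]
  simp only [if_neg hop]

-- run of B's machine over the rest of the section, followed by the final flush
def pvRun (lines : List String) (hi i : Nat) (st : PvBState) : PySem.Dict String String :=
  pvB_fin (((lines.drop i).take (hi - i)).foldl pvB_step st)

theorem pv_run_degenerate (lines : List String) (hi i : Nat) (st : PvBState) (h : hi ≤ i) :
    pvRun lines hi i st = pvB_fin st := by
  unfold pvRun
  rw [Nat.sub_eq_zero_of_le h]
  simp

theorem pv_run_step (lines : List String) (hi i : Nat) (st : PvBState)
    (h1 : i < hi) (h2 : hi ≤ lines.length) :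
    pvRun lines hi i st = pvRun lines hi (i + 1) (pvB_step st (lines.getD i "")) := by
  unfold pvRun
  rw [List.drop_eq_getElem_cons (show i < lines.length by omega),
    ← List.getD_eq_getElem lines "" (show i < lines.length by omega),
    show hi - i = (hi - (i + 1)) + 1 by omega, List.take_succ_cons, List.foldl_cons]

theorem pv_kloop_sim (lines : List String) (hi : Nat) (h2 : hi ≤ lines.length) :
    ∀ (fK : Nat) (k : Nat) (buf : List String) (r : String) (parts : List String)
      (d : PySem.Dict String String), hi - k ≤ fK →
    pvRun lines hi k ⟨some r, parts, some buf, d⟩ =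
      pvRun lines hi ((pvA_kloop lines hi fK k buf).1 + 1)
        ⟨some r, pvB_close (pvA_kloop lines hi fK k buf).2 parts, none, d⟩ := by
  intro fK
  induction fK with
  | zero =>
    intro k buf r parts d hfk
    rw [pvA_kloop, pv_run_degenerate lines hi k _ (by omega),
      pv_run_degenerate lines hi (k + 1) _ (by omega)]
    simp [pvB_fin]
  | succ fK ih =>
    intro k buf r parts d hfk
    rw [pvA_kloop]
    by_cases h : k < hi ∧ ¬ PySem.Str.strip (lines.getD k "") = "```"
    · rw [if_pos h, pv_run_step lines hi k _ h.1 h2]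
      have hx : ¬ PySem.Str.strip (lines[k]?.getD "") = "```" := by simpa [List.getD] using h.2
      have hstep : pvB_step ⟨some r, parts, some buf, d⟩ (lines.getD k "") =
          ⟨some r, parts, some (buf ++ [lines.getD k ""]), d⟩ := by
        simp [pvB_step, hx]
      rw [hstep]
      exact ih (k + 1) (buf ++ [lines.getD k ""]) r parts d (by omega)
    · rw [if_neg h]
      rcases Nat.lt_or_ge k hi with hlt | hge
      · have hs : PySem.Str.strip (lines.getD k "") = "```" := by
          by_contra hc
          exact h ⟨hlt, hc⟩
        rw [pv_run_step lines hi k _ hlt h2]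
        have hx : PySem.Str.strip (lines[k]?.getD "") = "```" := by simpa [List.getD] using hs
        have hstep : pvB_step ⟨some r, parts, some buf, d⟩ (lines.getD k "") =
            ⟨some r, pvB_close buf parts, none, d⟩ := by
          simp [pvB_step, hx]
        rw [hstep]
      · rw [pv_run_degenerate lines hi k _ hge, pv_run_degenerate lines hi (k + 1) _ (by omega)]
        simp [pvB_fin]

theorem pv_master (lines : List String) (hi : Nat) (hlen : hi ≤ lines.length) : ∀ n : Nat,
    (∀ i d fI, hi - i ≤ n → hi - i ≤ fI →
      pvRun lines hi i ⟨none, [], none, d⟩ = pvA_iloop lines hi fI i d) ∧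
    (∀ j r parts d fJ fI, hi - j ≤ n → hi - j ≤ fJ → hi - j ≤ fI →
      pvRun lines hi j ⟨some r, parts, none, d⟩ =
        pvA_iloop lines hi fI (pvA_jloop lines hi fJ j parts).1
          (if ¬ (pvA_jloop lines hi fJ j parts).2 = [] then
            d.insert r (PySem.Str.join "" (pvA_jloop lines hi fJ j parts).2)
          else d.insert r "")) := by
  have hP1deg : ∀ i d fI, hi ≤ i →
      pvRun lines hi i ⟨none, [], none, d⟩ = pvA_iloop lines hi fI i d := by
    intro i d fI h
    rw [pv_run_degenerate lines hi i _ h, pvA_iloop_stop lines hi fI i d (by omega)]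
    rfl
  have hP2deg : ∀ j r parts d fJ fI, hi ≤ j →
      pvRun lines hi j ⟨some r, parts, none, d⟩ =
        pvA_iloop lines hi fI (pvA_jloop lines hi fJ j parts).1
          (if ¬ (pvA_jloop lines hi fJ j parts).2 = [] then
            d.insert r (PySem.Str.join "" (pvA_jloop lines hi fJ j parts).2)
          else d.insert r "") := by
    intro j r parts d fJ fI h
    rw [pv_run_degenerate lines hi j _ h,
      pvA_jloop_stop lines hi fJ j parts (by omega)]
    rw [pvA_iloop_stop lines hi fI j _ (by omega), pv_insert_branch]
    rfl
  intro n
  induction n with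
  | zero =>
    exact ⟨fun i d fI h _ => hP1deg i d fI (by omega),
      fun j r parts d fJ fI h _ _ => hP2deg j r parts d fJ fI (by omega)⟩
  | succ n ih =>
    constructor
    · intro i d fI hn hfI
      rcases Nat.lt_or_ge i hi with hlt | hge
      · obtain ⟨fI', rfl⟩ : ∃ fI', fI = fI' + 1 := ⟨fI - 1, by omega⟩
        rw [pv_run_step lines hi i _ hlt hlen]
        cases hh : PySem.Str.startswith (lines.getD i "") "### `" with
        | false =>
          have hx := hh
          simp [List.getD] at hx
          have hstep : pvB_step ⟨none, [], none, d⟩ (lines.getD i "") = ⟨none, [], none, d⟩ := by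
            simp [pvB_step, hx]
          rw [hstep, ih.1 (i + 1) d fI' (by omega) (by omega),
            ← pvA_iloop_skip lines hi fI' i d hlt (by rw [pv_header_eq, hh])]
        | true =>
          have hx := hh
          simp [List.getD] at hx
          have hstep : pvB_step ⟨none, [], none, d⟩ (lines.getD i "") =
              ⟨some (pvB_rel (lines.getD i "")), [], none, d⟩ := by
            simp [pvB_step, hx]
          rw [hstep, ih.2 (i + 1) (pvB_rel (lines.getD i "")) [] d hi fI'
            (by omega) (by omega) (by omega),
            pvA_iloop_head lines hi fI' i d hlt (by rw [pv_header_eq, hh]),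
            pv_rel_eq _ hh]
      · exact hP1deg i d fI hge
    · intro j r parts d fJ fI hn hfJ hfI
      rcases Nat.lt_or_ge j hi with hlt | hge
      · rw [pv_run_step lines hi j _ hlt hlen]
        cases hh : PySem.Str.startswith (lines.getD j "") "### `" with
        | true =>
          obtain ⟨fI', rfl⟩ : ∃ fI', fI = fI' + 1 := ⟨fI - 1, by omega⟩
          have hx := hh
          simp [List.getD] at hx
          have hjl : pvA_jloop lines hi fJ j parts = (j, parts) :=
            pvA_jloop_stop lines hi fJ j parts (by rw [pv_header_eq, hh]; simp)
          have hstep : pvB_step ⟨some r, parts, none, d⟩ (lines.getD j "") =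
              ⟨some (pvB_rel (lines.getD j "")), [], none,
                d.insert r (PySem.Str.join "" parts)⟩ := by
            simp [pvB_step, hx]
          rw [hstep, ih.2 (j + 1) (pvB_rel (lines.getD j "")) []
            (d.insert r (PySem.Str.join "" parts)) hi fI' (by omega) (by omega) (by omega), hjl]
          simp only
          rw [pv_insert_branch,
            pvA_iloop_head lines hi fI' j _ hlt (by rw [pv_header_eq, hh]),
            pv_rel_eq _ hh]
          simp only [pv_insert_branch]
        | false =>
          obtain ⟨fJ', rfl⟩ : ∃ fJ', fJ = fJ' + 1 := ⟨fJ - 1, by omega⟩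
          have hx := hh
          simp [List.getD] at hx
          by_cases hop : PySem.Str.startswith (PySem.Str.strip (lines.getD j "")) "```" = true ∧
              ¬ PySem.Str.strip (lines.getD j "") = "```"
          · have hop' : PySem.Str.startswith (PySem.Str.strip (lines[j]?.getD "")) "```" = true ∧
                ¬ PySem.Str.strip (lines[j]?.getD "") = "```" := by
              simpa [List.getD] using hop
            have hstep : pvB_step ⟨some r, parts, none, d⟩ (lines.getD j "") =
                ⟨some r, parts, some [], d⟩ := by
              simp only [pvB_step, List.getD]
              rw [if_neg (by simp [hx]), if_pos (by simpa using hop')]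
            rw [hstep, pv_kloop_sim lines hi hlen hi (j + 1) [] r parts d (by omega), pv_close_eq]
            have hkle := pvA_kloop_le lines hi hi (j + 1) []
            rw [ih.2 ((pvA_kloop lines hi hi (j + 1) []).1 + 1) r
              (if ¬ (pvA_kloop lines hi hi (j + 1) []).2 = [] then
                parts ++ [pvA_chunk (pvA_kloop lines hi hi (j + 1) []).2] else parts) d fJ' fI
              (by omega) (by omega) (by omega),
              ← pvA_jloop_open lines hi fJ' j parts hlt (by rw [pv_header_eq, hh]) hop]
          · have hop' : ¬ (PySem.Str.startswith (PySem.Str.strip (lines[j]?.getD "")) "```" = true ∧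
                ¬ PySem.Str.strip (lines[j]?.getD "") = "```") := by
              simpa [List.getD] using hop
            have hstep : pvB_step ⟨some r, parts, none, d⟩ (lines.getD j "") =
                ⟨some r, parts, none, d⟩ := by
              simp only [pvB_step, List.getD]
              rw [if_neg (by simp [hx]),
                if_neg (by simp only [Option.isSome_some]; intro hcon; exact hop' ⟨by simpa using hcon.2.1, by simpa using hcon.2.2⟩)]
            rw [hstep, ih.2 (j + 1) r parts d fJ' fI (by omega) (by omega) (by omega),
              ← pvA_jloop_skip lines hi fJ' j parts hlt (by rw [pv_header_eq, hh]) hop]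
      · exact hP2deg j r parts d fJ fI hge

-- ===== VERDICT (by name: the statement is the Claim_ definition above) =====
theorem parse_stubbed_files_py_spec : Claim_equal_parse_stubbed_files_py := by
  intro text_lines _
  show parse_stubbed_files_py text_lines = parse_stubbed_files_py_alt text_lines
  show (pvA_iloop text_lines (pvA_bounds "## Files" text_lines).2
      (pvA_bounds "## Files" text_lines).2 (pvA_bounds "## Files" text_lines).1
      PySem.Dict.empty).items =
    (pvB_fin (List.foldl pvB_step ⟨none, [], none, PySem.Dict.empty⟩
      (PySem.List.slice text_lines (some ((pvB_bounds text_lines).1 : Int))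
        (some ((pvB_bounds text_lines).2 : Int))))).items
  rw [pv_bounds_eq, PySem.List.slice_natCast]
  obtain ⟨h1, h2⟩ := pv_bounds_le text_lines
  have hm := (pv_master text_lines (pvA_bounds "## Files" text_lines).2 h2
    (pvA_bounds "## Files" text_lines).2).1 (pvA_bounds "## Files" text_lines).1
    PySem.Dict.empty (pvA_bounds "## Files" text_lines).2 (by omega) (by omega)
  unfold pvRun at hm
  rw [← hm]
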